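-- pv_equiv track=rewrite | github.com/VICTOR-OMEGA/dumb-code-smart | challenge_01/main.py | solution
-- ===== SOURCE A (Python) =====
-- from typing import List
--
-- def solution(strs: List[str]) -> int:
--  seen = {}
--
--  for s in strs:
--   """Convert to lowercase and extract the unique character set"""
--   key = frozenset(s.lower())
--   if key in seen:
--    seen[key] += 1
--   else:
--    seen[key] = 1
--
--  #For each character set with more than one string, count combinations: nC2
--  return sum(count * (count - 1) // 2 for count in seen.values() if count > 1)
-- ===== SOURCE B (Python) =====
-- from typing import List
--
-- def solution(strs: List[str]) -> int:
--     total = 0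
--     prev = []
--     for s in strs:
--         key = frozenset(s.lower())
--         total += prev.count(key)
--         prev.append(key)
--     return total
-- ===== Notes on version B (the rewrite author's own statement) =====
-- stated objective: alternative
-- what changed: B uses no dictionary and no nC2 formula at all: it keeps a plain list of the char-set keys seen so far and, for each string, adds list.count of its key over that prefix (each match is one new pair), trading A's hash-grouping-then-combinatorics for direct pairwise counting over a list.
import Mathlib
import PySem

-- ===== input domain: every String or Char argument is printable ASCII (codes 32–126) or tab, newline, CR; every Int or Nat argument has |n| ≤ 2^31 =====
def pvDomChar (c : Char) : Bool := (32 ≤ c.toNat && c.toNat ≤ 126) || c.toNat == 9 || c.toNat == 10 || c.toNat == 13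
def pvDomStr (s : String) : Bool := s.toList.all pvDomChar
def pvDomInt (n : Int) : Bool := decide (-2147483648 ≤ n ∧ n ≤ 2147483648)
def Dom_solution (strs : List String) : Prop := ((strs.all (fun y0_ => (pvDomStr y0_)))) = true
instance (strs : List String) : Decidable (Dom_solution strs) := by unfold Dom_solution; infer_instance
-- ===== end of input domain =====

-- B drops A's dictionary and nC2 formula entirely: it keeps the list of keys seen so far and adds
-- list.count of the current key over that prefix (each match = one new pair); alternative, O(n^2).

-- frozenset(s.lower()) ported as the SORTED duplicate-free list of its characters: a canonical
-- representative, exact because two frozensets are equal iff these sorted nodup lists are equal.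
def pvKey (s : String) : List Char :=
  PySem.List.sorted (PySem.List.dedup (PySem.Str.lower s).toList) (fun x => x) false

-- ===== PORT A =====
def solution (strs : List String) : Int :=
  let seen := strs.foldl (fun seen s =>
      let key := pvKey s
      if seen.contains key then seen.insert key (seen.getD key 0 + 1)
      else seen.insert key 1) PySem.Dict.empty
  ((seen.values.filter (fun count => decide (1 < count))).map
    (fun count => PySem.Int.floordiv (count * (count - 1)) 2)).sum

-- ===== PORT B =====
def solution_alt (strs : List String) : Int :=
  (strs.foldl (fun (p : Int × List (List Char)) s =>
      let key := pvKey s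
      (p.1 + PySem.List.count p.2 key, p.2 ++ [key])) ((0 : Int), ([] : List (List Char)))).1

-- ===== PRECONDITION & SPEC =====
def Spec_solution (strs : List String) (out : Int) : Prop := out = solution_alt strs
instance (strs : List String) (out : Int) : Decidable (Spec_solution strs out) := by unfold Spec_solution; infer_instance

-- ===== CLAIM (what is proved, stated in full; the proofs are below) =====
def Claim_equal_solution : Prop := ∀ (strs : List String), Dom_solution strs → Spec_solution strs (solution strs)

-- ===== LEMMAS AND PROOFS =====

-- nC2 term of A, and the "potential" G of a dict: the sum of nC2 over its current counts.
def pvF (c : Int) : Int := PySem.Int.floordiv (c * (c - 1)) 2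

def pvG (d : PySem.Dict (List Char) Int) : Int :=
  (d.keys.map (fun k => pvF (d.getD k 0))).sum

-- the per-key counter step
def pvStep (d : PySem.Dict (List Char) Int) (k : List Char) : PySem.Dict (List Char) Int :=
  d.insert k (d.getD k 0 + 1)

lemma pvF_succ (c : Int) : pvF (c + 1) = pvF c + c := by
  obtain ⟨m, hm⟩ := Int.even_mul_succ_self (c - 1)
  have hm' : c * (c - 1) = m + m := by rw [← hm]; ring
  have h2 : (c + 1) * (c + 1 - 1) = c * (c - 1) + 2 * c := by ring
  unfold pvF
  rw [PySem.Int.floordiv_eq_ediv_of_pos (by norm_num),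
      PySem.Int.floordiv_eq_ediv_of_pos (by norm_num), h2]
  omega

lemma sum_map_congr_sub {K : Type} [DecidableEq K] (l : List K) (F G : K → Int) (k : K)
    (hk : k ∈ l) (hl : l.Nodup) (h : ∀ j ∈ l, j ≠ k → F j = G j) :
    (l.map F).sum = (l.map G).sum + (F k - G k) := by
  induction l with
  | nil => cases hk
  | cons a t ih =>
    rcases List.mem_cons.mp hk with rfl | hkt
    · have ht : ∀ j ∈ t, F j = G j := by
        intro j hj
        exact h j (List.mem_cons_of_mem _ hj) (fun hje => (List.nodup_cons.mp hl).1 (hje ▸ hj))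
      simp [List.map_cons, List.sum_cons, List.map_congr_left ht]; ring
    · have hak : a ≠ k := fun hae => (List.nodup_cons.mp hl).1 (hae ▸ hkt)
      have := ih hkt (List.nodup_cons.mp hl).2
        (fun j hj => h j (List.mem_cons_of_mem _ hj))
      simp only [List.map_cons, List.sum_cons, this,
        h a (List.mem_cons_self) hak]
      ring

lemma pvG_step (d : PySem.Dict (List Char) Int) (k : List Char) (hd : d.keys.Nodup) :
    pvG (pvStep d k) = pvG d + d.getD k 0 := by
  unfold pvG pvStep
  by_cases hc : d.contains k
  · rw [PySem.Dict.keys_insert_of_contains d _ hc]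
    have hk : k ∈ d.keys := (PySem.Dict.contains_iff_mem_keys d k).mp hc
    rw [sum_map_congr_sub d.keys _ (fun j => pvF (d.getD j 0)) k hk hd
        (by intro j hj hjk; rw [PySem.Dict.getD_insert]; simp [hjk])]
    rw [PySem.Dict.getD_insert]
    simp [pvF_succ]
  · have h0 : d.getD k 0 = 0 := PySem.Dict.getD_of_not_contains d 0 (by simpa using hc)
    rw [PySem.Dict.keys_insert_of_not_contains d _ (by simpa using hc)]
    rw [List.map_append, List.sum_append]
    have hmap : d.keys.map (fun j => pvF ((d.insert k (d.getD k 0 + 1)).getD j 0))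
        = d.keys.map (fun j => pvF (d.getD j 0)) := by
      apply List.map_congr_left
      intro j hj
      have hjk : j ≠ k := fun hje =>
        hc ((PySem.Dict.contains_iff_mem_keys d k).mpr (hje ▸ hj))
      rw [PySem.Dict.getD_insert]; simp [hjk]
    rw [hmap, h0]
    simp [PySem.Dict.getD_insert_self, pvF]

-- counter of a one-longer list = one counter step
lemma pvCounter_append (pre : List (List Char)) (k : List Char) :
    PySem.Dict.counter (pre ++ [k]) = pvStep (PySem.Dict.counter pre) k := by
  rw [← PySem.Dict.foldl_insert_getD_add_one_eq_counter,
      ← PySem.Dict.foldl_insert_getD_add_one_eq_counter,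
      List.foldl_append]
  rfl

-- B's loop invariant: running total = nC2 potential of the counter of the processed prefix.
lemma pvB_fold (ks : List (List Char)) (pre : List (List Char)) :
    (ks.foldl (fun (p : Int × List (List Char)) k =>
        (p.1 + PySem.List.count p.2 k, p.2 ++ [k]))
      (pvG (PySem.Dict.counter pre), pre)).1
      = pvG (PySem.Dict.counter (pre ++ ks)) := by
  induction ks generalizing pre with
  | nil => simp
  | cons k ks ih =>
    simp only [List.foldl_cons]
    have hcount : pvG (PySem.Dict.counter pre) + PySem.List.count pre k
        = pvG (PySem.Dict.counter (pre ++ [k])) := by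
      rw [pvCounter_append, pvG_step _ _ (PySem.Dict.nodup_keys_counter pre),
          PySem.Dict.getD_counter, PySem.List.count_eq]
    rw [hcount, ih (pre ++ [k])]
    simp

lemma pvFiltered_sum (vs : List Int) (h : ∀ v ∈ vs, 1 ≤ v) :
    ((vs.filter (fun count => decide (1 < count))).map pvF).sum
      = (vs.map pvF).sum := by
  induction vs with
  | nil => rfl
  | cons v t ih =>
    have hv : 1 ≤ v := h v (List.mem_cons_self)
    have ht := ih (fun w hw => h w (List.mem_cons_of_mem _ hw))
    rw [List.filter_cons]
    by_cases h1 : 1 < v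
    · simp only [h1, decide_true, if_true, List.map_cons, List.sum_cons, ht]
    · have hv1 : v = 1 := le_antisymm (by omega) hv
      subst hv1
      have hF1 : pvF 1 = 0 := by decide
      simpa [hF1] using ht

-- ===== VERDICT (by name: the statement is the Claim_ definition above) =====
theorem solution_spec : Claim_equal_solution := by
  intro strs _
  unfold Spec_solution solution solution_alt
  -- A's loop, as a counter fold over the list of keys
  have hA : strs.foldl (fun seen s =>
      let key := pvKey s
      if seen.contains key then seen.insert key (seen.getD key 0 + 1)
      else seen.insert key 1) PySem.Dict.empty
      = (strs.map pvKey).foldl pvStep PySem.Dict.empty := by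
    rw [List.foldl_map]
    apply PySem.List.foldl_congr_mem
    intro d s _
    by_cases hc : d.contains (pvKey s)
    · simp [pvStep, hc]
    · have h0 : d.getD (pvKey s) 0 = 0 :=
        PySem.Dict.getD_of_not_contains d 0 (by simpa using hc)
      simp [pvStep, hc, h0]
  -- B's loop, as a fold over the list of keys
  have hB : strs.foldl (fun (p : Int × List (List Char)) s =>
      let key := pvKey s
      (p.1 + PySem.List.count p.2 key, p.2 ++ [key])) ((0 : Int), ([] : List (List Char)))
      = (strs.map pvKey).foldl (fun (p : Int × List (List Char)) k =>
          (p.1 + PySem.List.count p.2 k, p.2 ++ [k])) ((0 : Int), ([] : List (List Char))) := by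
    rw [List.foldl_map]
  rw [hA, hB]
  set ks := strs.map pvKey with hks
  have hcounter : ks.foldl pvStep PySem.Dict.empty = PySem.Dict.counter ks := by
    rw [← PySem.Dict.foldl_insert_getD_add_one_eq_counter]
    rfl
  have hGe : pvG (PySem.Dict.counter ([] : List (List Char))) = 0 := by decide
  have hBval := pvB_fold ks []
  rw [hGe] at hBval
  simp only [List.nil_append] at hBval
  rw [hBval, hcounter]
  -- A's filtered sum over the counter's values equals the potential of the counter
  have hvals : (PySem.Dict.counter ks).values
      = (PySem.Dict.counter ks).keys.map (fun k => (PySem.Dict.counter ks).getD k 0) :=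
    PySem.Dict.values_eq_map_keys _ (PySem.Dict.nodup_keys_counter ks) 0
  have hpos : ∀ v ∈ (PySem.Dict.counter ks).values, (1 : Int) ≤ v := by
    intro v hv
    rw [hvals] at hv
    obtain ⟨k, hk, rfl⟩ := List.mem_map.mp hv
    rw [PySem.Dict.getD_counter]
    have hkks : k ∈ ks := by
      have := hk
      rw [PySem.Dict.keys_counter] at this
      exact (PySem.Set.mem_ofList _ _).mp this
    have hc0 : 0 < ks.count k := List.count_pos_iff.mpr hkks
    exact_mod_cast hc0
  rw [show (fun count => PySem.Int.floordiv (count * (count - 1)) 2) = pvF from rfl]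
  rw [pvFiltered_sum _ hpos, hvals, List.map_map]
  simp [pvG, Function.comp_def]
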